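-- pv_equiv track=rewrite | github.com/vosslab/niltc-web | python_tools/wordpress_to_markdown.py | ensure_more_tag_once
-- ===== SOURCE A (Python) =====
-- def ensure_more_tag_once(md: str) -> str:
-- 	"""
-- 	Ensure there is one <!-- more --> tag, best-effort.
--
-- 	Args:
-- 		md (str): Markdown.
--
-- 	Returns:
-- 		str: Markdown.
-- 	"""
-- 	if '<!-- more -->' in md:
-- 		return md
--
-- 	lines = md.splitlines()
-- 	out = []
-- 	inserted = False
--
-- 	for line in lines:
-- 		if not inserted and line.startswith('## '):
-- 			out.append('<!-- more -->')
-- 			out.append('')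
-- 			inserted = True
-- 		out.append(line)
--
-- 	if not inserted:
-- 		out.append('')
-- 		out.append('<!-- more -->')
--
-- 	return "\n".join(out) + "\n"
-- ===== SOURCE B (Python) =====
-- def ensure_more_tag_once(md: str) -> str:
--     """Ensure there is one <!-- more --> tag, best-effort."""
--     if '<!-- more -->' in md:
--         return md
--     if not md:
--         return "\n<!-- more -->\n"
--     # Normalize line endings once, then work on the whole text with
--     # substring search and slicing instead of a per-line loop.
--     text = "\n".join(md.splitlines())
--     if text.startswith('## '):
--         return '<!-- more -->\n\n' + text + '\n'
--     pos = text.find('\n## ')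
--     if pos == -1:
--         return text + '\n\n<!-- more -->\n'
--     return text[:pos + 1] + '<!-- more -->\n\n' + text[pos + 1:] + '\n'
-- ===== Notes on version B (the rewrite author's own statement) =====
-- stated objective: alternative
-- what changed: Replaces the per-line flag-and-accumulate loop by a single normalization join of the split lines followed by whole-text substring search (startswith / find of the newline-plus-header-marker pattern) and string slicing to splice the tag in.
import Mathlib
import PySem

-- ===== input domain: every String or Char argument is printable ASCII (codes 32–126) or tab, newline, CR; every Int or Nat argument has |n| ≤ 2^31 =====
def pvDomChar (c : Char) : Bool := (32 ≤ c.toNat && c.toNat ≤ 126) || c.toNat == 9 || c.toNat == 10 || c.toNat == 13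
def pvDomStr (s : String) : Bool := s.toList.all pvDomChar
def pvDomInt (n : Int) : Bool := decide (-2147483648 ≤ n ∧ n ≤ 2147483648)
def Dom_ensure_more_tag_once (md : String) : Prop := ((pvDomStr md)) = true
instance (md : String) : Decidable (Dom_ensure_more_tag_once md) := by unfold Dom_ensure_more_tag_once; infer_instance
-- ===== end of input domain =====

-- B replaces A's per-line flag-and-accumulate loop by normalizing once and then
-- locating the insertion point with whole-text substring search and slicing (alternative algorithm, same cost).

-- ===== PORT A =====
-- the body of A's 'for line in lines' loop (state = (out, inserted))
def pvStepA (acc : List String × Bool) (line : String) : List String × Bool :=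
  if !acc.2 && PySem.Str.startswith line "## " then
    (acc.1 ++ ["<!-- more -->", "", line], true)
  else
    (acc.1 ++ [line], acc.2)

def ensure_more_tag_once (md : String) : String :=
  if PySem.Str.isIn "<!-- more -->" md then md
  else
    let lines := PySem.Str.splitlines md
    let res := lines.foldl pvStepA ([], false)
    let out := if !res.2 then res.1 ++ ["", "<!-- more -->"] else res.1
    PySem.Str.join "\n" out ++ "\n"

-- ===== PORT B =====
def ensure_more_tag_once_alt (md : String) : String :=
  if PySem.Str.isIn "<!-- more -->" md then md
  else if md = "" then "\n<!-- more -->\n"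
  else
    let text := PySem.Str.join "\n" (PySem.Str.splitlines md)
    if PySem.Str.startswith text "## " then "<!-- more -->\n\n" ++ text ++ "\n"
    else
      let pos := PySem.Str.find text "\n## "
      if pos = -1 then text ++ "\n\n<!-- more -->\n"
      else
        PySem.Str.slice text none (some (pos + 1)) ++ "<!-- more -->\n\n" ++
          PySem.Str.slice text (some (pos + 1)) none ++ "\n"

-- ===== PRECONDITION & SPEC =====
def Spec_ensure_more_tag_once (md : String) (out : String) : Prop := out = ensure_more_tag_once_alt md
instance (md : String) (out : String) : Decidable (Spec_ensure_more_tag_once md out) := by unfold Spec_ensure_more_tag_once; infer_instance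

-- ===== CLAIM (what is proved, stated in full; the proofs are below) =====
def Claim_equal_ensure_more_tag_once : Prop := ∀ (md : String), Dom_ensure_more_tag_once md → Spec_ensure_more_tag_once md (ensure_more_tag_once md)

-- ===== LEMMAS AND PROOFS =====

-- the tag as a character list
def moreT : List Char := "<!-- more -->".toList

-- reference insertion function: what A's loop produces (string level)
def insS : List String → List String
  | [] => ["", "<!-- more -->"]
  | l :: r => if PySem.Str.startswith l "## " then "<!-- more -->" :: "" :: l :: r else l :: insS r

-- the same on character lists
def insC : List (List Char) → List (List Char)
  | [] => [[], moreT]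
  | l :: r => if PySem.Chars.startswith l ['#','#',' '] then moreT :: [] :: l :: r else l :: insC r

-- once inserted, A's loop only appends the remaining lines
theorem pvStepA_true (lines : List String) (out : List String) :
    lines.foldl pvStepA (out, true) = (out ++ lines, true) := by
  induction lines generalizing out with
  | nil => simp
  | cons l ls ih => simp [pvStepA, ih]

-- A's loop + trailing append = the reference insertion
theorem lemA (lines : List String) (out : List String) :
    (if !(lines.foldl pvStepA (out, false)).2
      then (lines.foldl pvStepA (out, false)).1 ++ ["", "<!-- more -->"]
      else (lines.foldl pvStepA (out, false)).1) = out ++ insS lines := by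
  induction lines generalizing out with
  | nil => simp [insS]
  | cons l ls ih =>
    by_cases h : PySem.Chars.startswith l.toList ['#','#',' '] = true
    · rw [List.foldl_cons, show pvStepA (out, false) l = (out ++ ["<!-- more -->", "", l], true) by
        simp [pvStepA, h], pvStepA_true]
      simp [insS, h]
    · rw [List.foldl_cons, show pvStepA (out, false) l = (out ++ [l], false) by
        simp [pvStepA, h], ih]
      simp [insS, h]

-- insS and insC agree through toList
theorem insS_toList (xs : List String) :
    (insS xs).map String.toList = insC (xs.map String.toList) := by
  induction xs with
  | nil => simp [insS, insC, moreT]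
  | cons l r ih =>
    by_cases h : PySem.Chars.startswith l.toList ['#','#',' '] = true
    · simp [insS, insC, h, moreT]
    · simp [insS, insC, h, ih]

-- step equations for splitlines.go
theorem go_rn (isB : Char → Bool) (rest cur : List Char) (acc : List (List Char)) :
    PySem.Chars.splitlines.go isB ('\x0d'::'\n'::rest) cur acc
      = PySem.Chars.splitlines.go isB rest [] (cur.reverse :: acc) := rfl

theorem go_cons (isB : Char → Bool) (c : Char) (rest cur : List Char) (acc : List (List Char))
    (hne : ∀ r', ¬(c = '\x0d' ∧ rest = '\n' :: r')) :
    PySem.Chars.splitlines.go isB (c::rest) cur acc =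
      if isB c then PySem.Chars.splitlines.go isB rest [] (cur.reverse :: acc)
      else PySem.Chars.splitlines.go isB rest (c :: cur) acc := by
  rw [PySem.Chars.splitlines.go.eq_def]
  split
  · rename_i heq; exact absurd heq (by simp)
  · rename_i r' heq
    rw [List.cons.injEq] at heq
    exact absurd ⟨heq.1, heq.2⟩ (hne r')
  · rename_i c' r' hx heq
    rw [List.cons.injEq] at heq
    rw [heq.1, heq.2]

-- splitlines.go never returns [] unless everything is empty
theorem go_ne_nil (isB : Char → Bool) (s cur : List Char) (acc : List (List Char))
    (h : acc ≠ [] ∨ cur ≠ [] ∨ s ≠ []) :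
    PySem.Chars.splitlines.go isB s cur acc ≠ [] := by
  induction s, cur, acc using PySem.Chars.splitlines.go.induct isB with
  | case1 cur acc hcur =>
    simp [PySem.Chars.splitlines.go]
    rcases h with h | h | h
    · simpa [List.isEmpty_iff.mp hcur] using h
    · exact absurd (List.isEmpty_iff.mp hcur) h
    · exact absurd rfl h
  | case2 cur acc hcur =>
    simp [PySem.Chars.splitlines.go, hcur]
  | case3 rest cur acc ih =>
    rw [go_rn]
    exact ih (Or.inl (by simp))
  | case4 c rest cur acc hne hB ih =>
    rw [go_cons isB c rest cur acc (fun r' hp => hne r' hp.1 hp.2), if_pos hB]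
    exact ih (Or.inl (by simp))
  | case5 c rest cur acc hne hB ih =>
    rw [go_cons isB c rest cur acc (fun r' hp => hne r' hp.1 hp.2), if_neg hB]
    exact ih (Or.inr (Or.inl (by simp)))

-- lines produced by splitlines.go contain no newline (when isB catches '\n')
theorem go_nl_free (isB : Char → Bool) (hB : isB '\n' = true) (s cur : List Char)
    (acc : List (List Char)) (hcur : '\n' ∉ cur) (hacc : ∀ l ∈ acc, '\n' ∉ l) :
    ∀ l ∈ PySem.Chars.splitlines.go isB s cur acc, '\n' ∉ l := by
  induction s, cur, acc using PySem.Chars.splitlines.go.induct isB with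
  | case1 cur acc h =>
    simp [PySem.Chars.splitlines.go, List.isEmpty_iff.mp h]
    intro l hl
    exact hacc l hl
  | case2 cur acc h =>
    simp [PySem.Chars.splitlines.go, h]
    intro l hl
    rcases hl with hl | hl
    · exact hacc l hl
    · rw [hl]; simpa using hcur
  | case3 rest cur acc ih =>
    rw [go_rn]
    refine ih (by simp) ?_
    intro l hl
    rcases List.mem_cons.mp hl with hl | hl
    · rw [hl]; simpa using hcur
    · exact hacc l hl
  | case4 c rest cur acc hne hB' ih =>
    rw [go_cons isB c rest cur acc (fun r' hp => hne r' hp.1 hp.2), if_pos hB']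
    refine ih (by simp) ?_
    intro l hl
    rcases List.mem_cons.mp hl with hl | hl
    · rw [hl]; simpa using hcur
    · exact hacc l hl
  | case5 c rest cur acc hne hB' ih =>
    rw [go_cons isB c rest cur acc (fun r' hp => hne r' hp.1 hp.2), if_neg hB']
    refine ih ?_ hacc
    intro hmem
    rcases List.mem_cons.mp hmem with hl | hl
    · rw [hl] at hB; exact hB' hB
    · exact hcur hl

-- join with a nonempty tail
theorem join_cons_ne (sep x : List Char) (ys : List (List Char)) (h : ys ≠ []) :
    PySem.Chars.join sep (x :: ys) = x ++ sep ++ PySem.Chars.join sep ys := by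
  cases ys with
  | nil => exact absurd rfl h
  | cons q r => exact PySem.Chars.join_cons_cons sep x q r

-- insC never returns []
theorem insC_ne_nil (xs : List (List Char)) : insC xs ≠ [] := by
  cases xs with
  | nil => simp [insC]
  | cons l r =>
    by_cases h : PySem.Chars.startswith l ['#','#',' '] = true <;> simp [insC, h]

-- '## ' is a prefix across an append whose right side starts with '\n'
theorem sw1 (l r : List Char) :
    (['#','#',' '] <+: l ++ '\n' :: r) ↔ (['#','#',' '] <+: l) := by
  rcases l with _ | ⟨a, _ | ⟨b, _ | ⟨c, t⟩⟩⟩ <;> simp [List.cons_prefix_cons]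

-- first line of a join decides the '## ' prefix
theorem sw_join (l : List Char) (ls : List (List Char)) :
    (['#','#',' '] <+: PySem.Chars.join ['\n'] (l :: ls)) ↔ (['#','#',' '] <+: l) := by
  cases ls with
  | nil => rw [PySem.Chars.join_singleton]
  | cons q r =>
    rw [PySem.Chars.join_cons_cons]
    have h : l ++ ['\n'] ++ PySem.Chars.join ['\n'] (q :: r)
        = l ++ '\n' :: PySem.Chars.join ['\n'] (q :: r) := by simp
    rw [h, sw1]

-- find = k when there is a prefix occurrence at k and none earlier
theorem findEq (s sub : List Char) (k : Nat) (hk : sub <+: s.drop k)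
    (hmin : ∀ j < k, ¬ sub <+: s.drop j) : PySem.Chars.find s sub = (k : Int) := by
  have hin : PySem.Chars.isIn sub s = true :=
    (PySem.Chars.exists_prefix_drop_iff_isIn sub s).mp ⟨k, hk⟩
  have h0 : 0 ≤ PySem.Chars.find s sub :=
    (PySem.Chars.find_nonneg_iff s sub).mpr ((PySem.Chars.isIn_iff_infix sub s).mp hin)
  obtain ⟨hpre, hlt⟩ := PySem.Chars.find_spec h0
  rcases lt_trichotomy (PySem.Chars.find s sub).toNat k with h | h | h
  · exact absurd hpre (hmin _ h)
  · omega
  · exact absurd hk (hlt k h)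

-- no '\n## ' occurrence can start inside a newline-free line
theorem noNl (l rest : List Char) (j : Nat) (hl : '\n' ∉ l) (hj : j < l.length) :
    ¬ (['\n','#','#',' '] <+: (l ++ rest).drop j) := by
  intro h
  rw [List.drop_append_of_le_length (le_of_lt hj), List.drop_eq_getElem_cons hj] at h
  rw [List.cons_append, List.cons_prefix_cons] at h
  exact hl (h.1 ▸ List.getElem_mem hj)

-- occurrence at a line boundary = header prefix of the rest
theorem prefix_nl (X : List Char) :
    (['\n','#','#',' '] <+: '\n' :: X) ↔ (['#','#',' '] <+: X) := by
  rw [List.cons_prefix_cons]; simp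

-- a newline-free line contains no '\n## ' at all
theorem noOcc (l : List Char) (hl : '\n' ∉ l) : PySem.Chars.find l ['\n','#','#',' '] = -1 := by
  rw [PySem.Chars.find_eq_neg_one_iff]
  intro h
  exact hl (h.subset (by simp))

-- no occurrence of '\n## ' in l ++ '\n' :: R when none in R and no header at the boundary
theorem shiftNone (l R : List Char) (hl : '\n' ∉ l) (hH : ¬ ['#','#',' '] <+: R)
    (hR : PySem.Chars.find R ['\n','#','#',' '] = -1) :
    PySem.Chars.find (l ++ '\n' :: R) ['\n','#','#',' '] = -1 := by
  rw [PySem.Chars.find_eq_neg_one_iff]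
  intro h
  obtain ⟨j, hj⟩ := (PySem.Chars.exists_prefix_drop_iff_isIn _ _).mpr
    ((PySem.Chars.isIn_iff_infix _ _).mpr h)
  rcases Nat.lt_or_ge j l.length with hjl | hjl
  · exact noNl l _ j hl hjl hj
  · obtain ⟨n, rfl⟩ : ∃ n, j = l.length + n := ⟨j - l.length, by omega⟩
    rw [List.drop_length_add_append] at hj
    cases n with
    | zero => exact hH ((prefix_nl R).mp (by simpa using hj))
    | succ m =>
      rw [List.drop_succ_cons] at hj
      rw [PySem.Chars.find_eq_neg_one_iff] at hR
      exact hR ((PySem.Chars.isIn_iff_infix _ _).mp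
        ((PySem.Chars.exists_prefix_drop_iff_isIn _ _).mp ⟨m, hj⟩))

-- shift of the first occurrence across a safe line
theorem shiftSome (l R : List Char) (hl : '\n' ∉ l) (hH : ¬ ['#','#',' '] <+: R)
    (hR : 0 ≤ PySem.Chars.find R ['\n','#','#',' ']) :
    PySem.Chars.find (l ++ '\n' :: R) ['\n','#','#',' ']
      = (l.length : Int) + 1 + PySem.Chars.find R ['\n','#','#',' '] := by
  obtain ⟨hpre, hlt⟩ := PySem.Chars.find_spec hR
  set f := (PySem.Chars.find R ['\n','#','#',' ']).toNat with hf
  have hmain : PySem.Chars.find (l ++ '\n' :: R) ['\n','#','#',' ']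
      = ((l.length + (f + 1) : Nat) : Int) := by
    apply findEq
    · rw [List.drop_length_add_append, List.drop_succ_cons]
      exact hpre
    · intro j hj
      rcases Nat.lt_or_ge j l.length with hjl | hjl
      · exact noNl l _ j hl hjl
      · obtain ⟨n, rfl⟩ : ∃ n, j = l.length + n := ⟨j - l.length, by omega⟩
        rw [List.drop_length_add_append]
        cases n with
        | zero => intro hc; exact hH ((prefix_nl R).mp (by simpa using hc))
        | succ m =>
          rw [List.drop_succ_cons]
          exact hlt m (by omega)
  omega

-- first occurrence when the rest does start with a header
theorem hdrFind (l R : List Char) (hl : '\n' ∉ l) (hH : ['#','#',' '] <+: R) :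
    PySem.Chars.find (l ++ '\n' :: R) ['\n','#','#',' '] = (l.length : Int) := by
  have h0 : (l.length : Int) = ((l.length + 0 : Nat) : Int) := by omega
  rw [h0]
  apply findEq
  · rw [List.drop_length_add_append]
    simpa using (prefix_nl R).mpr hH
  · intro j hj
    exact noNl l _ j hl (by omega)

-- take across an append, offset by the left length
theorem take_len_add {a : Type} (l1 l2 : List a) (k : Nat) :
    (l1 ++ l2).take (l1.length + k) = l1 ++ l2.take k := by
  induction l1 with
  | nil => simp
  | cons x xs ih =>
    have h : (x :: xs).length + k = (xs.length + k) + 1 := by simp; omega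
    rw [List.cons_append, h, List.take_succ_cons, ih, List.cons_append]

-- the core equivalence on character lists: A's insertion = B's search-and-splice
theorem core (ls : List (List Char)) : ∀ (l : List Char), '\n' ∉ l → (∀ x ∈ ls, '\n' ∉ x) →
    PySem.Chars.startswith l ['#','#',' '] = false →
    PySem.Chars.join ['\n'] (insC (l :: ls)) =
      (if PySem.Chars.find (PySem.Chars.join ['\n'] (l :: ls)) ['\n','#','#',' '] = -1 then
        PySem.Chars.join ['\n'] (l :: ls) ++ ['\n','\n'] ++ moreT
      else
        (PySem.Chars.join ['\n'] (l :: ls)).take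
            ((PySem.Chars.find (PySem.Chars.join ['\n'] (l :: ls)) ['\n','#','#',' ']).toNat + 1)
          ++ moreT ++ ['\n','\n'] ++
          (PySem.Chars.join ['\n'] (l :: ls)).drop
            ((PySem.Chars.find (PySem.Chars.join ['\n'] (l :: ls)) ['\n','#','#',' ']).toNat + 1)) := by
  induction ls with
  | nil =>
    intro l hl _ hhdr
    have hf := noOcc l hl
    have hins : insC [l] = [l, [], moreT] := by simp [insC, hhdr]
    simp only [hins, PySem.Chars.join_cons_cons, PySem.Chars.join_singleton, hf]
    simp
  | cons q rest ih =>
    intro l hl hfree hhdr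
    have hqf : '\n' ∉ q := hfree q (by simp)
    have hrf : ∀ x ∈ rest, '\n' ∉ x := fun x hx => hfree x (by simp [hx])
    have hJ : PySem.Chars.join ['\n'] (l :: q :: rest)
        = l ++ '\n' :: PySem.Chars.join ['\n'] (q :: rest) := by
      rw [PySem.Chars.join_cons_cons]; simp
    by_cases hq : PySem.Chars.startswith q ['#','#',' '] = true
    · have hH : ['#','#',' '] <+: PySem.Chars.join ['\n'] (q :: rest) :=
        (sw_join q rest).mpr ((PySem.Chars.startswith_iff q _).mp hq)
      have hfind : PySem.Chars.find (PySem.Chars.join ['\n'] (l :: q :: rest)) ['\n','#','#',' ']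
          = (l.length : Int) := by
        rw [hJ]; exact hdrFind l _ hl hH
      have hne : ((l.length : Int)) ≠ -1 := by omega
      have hins : insC (l :: q :: rest) = l :: moreT :: [] :: q :: rest := by
        simp [insC, hhdr, hq]
      have htn : ((l.length : Int)).toNat + 1 = l.length + 1 := by omega
      rw [hins, hfind, if_neg hne, htn, hJ]
      rw [take_len_add l ('\n' :: PySem.Chars.join ['\n'] (q :: rest)) 1,
        List.drop_length_add_append]
      simp [PySem.Chars.join_cons_cons]
    · rw [Bool.not_eq_true] at hq
      have hH : ¬ ['#','#',' '] <+: PySem.Chars.join ['\n'] (q :: rest) := fun hpre =>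
        absurd ((PySem.Chars.startswith_iff q _).mpr ((sw_join q rest).mp hpre)) (by simp [hq])
      have hins : insC (l :: q :: rest) = l :: insC (q :: rest) := by
        simp [insC, hhdr]
      have hjoin : PySem.Chars.join ['\n'] (insC (l :: q :: rest))
          = l ++ '\n' :: PySem.Chars.join ['\n'] (insC (q :: rest)) := by
        rw [hins, join_cons_ne _ _ _ (insC_ne_nil _)]; simp
      have IH := ih q hqf hrf hq
      by_cases hf : PySem.Chars.find (PySem.Chars.join ['\n'] (q :: rest)) ['\n','#','#',' '] = -1
      · have hfind : PySem.Chars.find (l ++ '\n' :: PySem.Chars.join ['\n'] (q :: rest))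
            ['\n','#','#',' '] = -1 :=
          shiftNone l _ hl hH hf
        rw [hjoin, IH, if_pos hf, hJ, hfind, if_pos rfl]
        simp
      · have h0 : 0 ≤ PySem.Chars.find (PySem.Chars.join ['\n'] (q :: rest)) ['\n','#','#',' '] := by
          have := PySem.Chars.neg_one_le_find (PySem.Chars.join ['\n'] (q :: rest)) ['\n','#','#',' ']
          omega
        have hfind : PySem.Chars.find (l ++ '\n' :: PySem.Chars.join ['\n'] (q :: rest))
            ['\n','#','#',' ']
            = (l.length : Int) + 1
              + PySem.Chars.find (PySem.Chars.join ['\n'] (q :: rest)) ['\n','#','#',' '] :=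
          shiftSome l _ hl hH h0
        have hcond : ¬ (PySem.Chars.find (l ++ '\n' :: PySem.Chars.join ['\n'] (q :: rest))
            ['\n','#','#',' '] = -1) := by
          rw [hfind]; omega
        have htn : (PySem.Chars.find (l ++ '\n' :: PySem.Chars.join ['\n'] (q :: rest))
              ['\n','#','#',' ']).toNat + 1
            = l.length + ((PySem.Chars.find (PySem.Chars.join ['\n'] (q :: rest))
              ['\n','#','#',' ']).toNat + 1 + 1) := by
          rw [hfind]; omega
        rw [hjoin, IH, if_neg hf, hJ, if_neg hcond, htn]
        rw [take_len_add, List.drop_length_add_append]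
        simp [List.take_succ_cons, List.drop_succ_cons]

-- ===== VERDICT (by name: the statement is the Claim_ definition above) =====
theorem ensure_more_tag_once_spec : Claim_equal_ensure_more_tag_once := by
  intro md _
  show ensure_more_tag_once md = ensure_more_tag_once_alt md
  by_cases hin : PySem.Str.isIn "<!-- more -->" md = true
  · unfold ensure_more_tag_once ensure_more_tag_once_alt
    rw [if_pos hin, if_pos hin]
  · by_cases hmd : md = ""
    · subst hmd; rfl
    · obtain ⟨s0, rs, hsp⟩ : ∃ a r, PySem.Str.splitlines md = a :: r := by
        cases h : PySem.Str.splitlines md with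
        | nil =>
          exfalso
          have h2 : PySem.Chars.splitlines md.toList = [] := by
            rw [← PySem.Str.splitlines_map_toList, h]; rfl
          have h3 : md.toList ≠ [] := by simpa [String.toList_eq_nil_iff] using hmd
          unfold PySem.Chars.splitlines at h2
          exact go_ne_nil _ md.toList [] [] (Or.inr (Or.inr h3)) h2
        | cons a r => exact ⟨a, r, rfl⟩
      have hfree : ∀ x ∈ (PySem.Str.splitlines md).map String.toList, '\n' ∉ x := by
        rw [PySem.Str.splitlines_map_toList]
        unfold PySem.Chars.splitlines
        exact go_nl_free _ (by decide) md.toList [] [] (by simp) (by simp)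
      rw [hsp] at hfree
      have hs0 : '\n' ∉ s0.toList := hfree s0.toList (by simp)
      have hrs : ∀ x ∈ rs.map String.toList, '\n' ∉ x := fun x hx => hfree x (by simp [hx])
      unfold ensure_more_tag_once ensure_more_tag_once_alt
      rw [if_neg hin, if_neg hin, if_neg hmd]
      show PySem.Str.join "\n"
          (if !(List.foldl pvStepA ([], false) (PySem.Str.splitlines md)).2 then
            (List.foldl pvStepA ([], false) (PySem.Str.splitlines md)).1 ++ ["", "<!-- more -->"]
          else (List.foldl pvStepA ([], false) (PySem.Str.splitlines md)).1) ++ "\n"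
        = (if PySem.Str.startswith (PySem.Str.join "\n" (PySem.Str.splitlines md)) "## " then
            "<!-- more -->\n\n" ++ PySem.Str.join "\n" (PySem.Str.splitlines md) ++ "\n"
          else if PySem.Str.find (PySem.Str.join "\n" (PySem.Str.splitlines md)) "\n## " = -1 then
            PySem.Str.join "\n" (PySem.Str.splitlines md) ++ "\n\n<!-- more -->\n"
          else
            PySem.Str.slice (PySem.Str.join "\n" (PySem.Str.splitlines md)) none
                (some (PySem.Str.find (PySem.Str.join "\n" (PySem.Str.splitlines md)) "\n## " + 1)) ++
              "<!-- more -->\n\n" ++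
              PySem.Str.slice (PySem.Str.join "\n" (PySem.Str.splitlines md))
                (some (PySem.Str.find (PySem.Str.join "\n" (PySem.Str.splitlines md)) "\n## " + 1)) none
              ++ "\n")
      rw [lemA, List.nil_append, hsp]
      have hhdreq : PySem.Str.startswith (PySem.Str.join "\n" (s0 :: rs)) "## "
          = PySem.Chars.startswith s0.toList ['#','#',' '] := by
        rw [PySem.Str.startswith_eq, PySem.Str.toList_join]
        rw [show ("\n".toList) = ['\n'] from rfl, show ("## ".toList) = ['#','#',' '] from rfl,
          List.map_cons]
        apply Bool.eq_iff_iff.mpr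
        rw [PySem.Chars.startswith_iff, PySem.Chars.startswith_iff]
        exact sw_join _ _
      by_cases hhdr : PySem.Chars.startswith s0.toList ['#','#',' '] = true
      · rw [if_pos (by rw [hhdreq]; exact hhdr)]
        have hinsS : insS (s0 :: rs) = "<!-- more -->" :: "" :: s0 :: rs := by
          simp [insS, hhdr]
        rw [hinsS, ← String.toList_inj]
        simp only [String.toList_append, PySem.Str.toList_join, List.map_cons]
        rw [show ("\n".toList) = ['\n'] from rfl,
          show ("<!-- more -->\n\n".toList) = moreT ++ ['\n','\n'] from rfl,
          show (String.toList "<!-- more -->") = moreT from rfl,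
          show (String.toList "") = ([] : List Char) from rfl]
        rw [PySem.Chars.join_cons_cons, PySem.Chars.join_cons_cons]
        simp
      · rw [Bool.not_eq_true] at hhdr
        rw [if_neg (by rw [hhdreq, hhdr]; simp)]
        have hfeq : PySem.Str.find (PySem.Str.join "\n" (s0 :: rs)) "\n## "
            = PySem.Chars.find (PySem.Chars.join ['\n'] (s0.toList :: rs.map String.toList))
                ['\n','#','#',' '] := by
          rw [PySem.Str.find_eq, PySem.Str.toList_join, List.map_cons]
          rfl
        have hcore := core (rs.map String.toList) s0.toList hs0 hrs hhdr
        by_cases hf : PySem.Chars.find (PySem.Chars.join ['\n'] (s0.toList :: rs.map String.toList))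
            ['\n','#','#',' '] = -1
        · rw [if_pos (by rw [hfeq]; exact hf)]
          rw [← String.toList_inj]
          simp only [String.toList_append, PySem.Str.toList_join, List.map_cons]
          rw [show ("\n".toList) = ['\n'] from rfl,
            show ("\n\n<!-- more -->\n".toList) = ['\n','\n'] ++ moreT ++ ['\n'] from rfl]
          rw [show (List.map String.toList (insS (s0 :: rs)))
              = insC (s0.toList :: rs.map String.toList) from by
            rw [insS_toList, List.map_cons]]
          rw [hcore, if_pos hf]
          simp
        · rw [if_neg (by rw [hfeq]; exact hf)]
          have h0 : 0 ≤ PySem.Chars.find (PySem.Chars.join ['\n']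
              (s0.toList :: rs.map String.toList)) ['\n','#','#',' '] := by
            have := PySem.Chars.neg_one_le_find
              (PySem.Chars.join ['\n'] (s0.toList :: rs.map String.toList)) ['\n','#','#',' ']
            omega
          have hcast : PySem.Str.find (PySem.Str.join "\n" (s0 :: rs)) "\n## " + 1
              = (((PySem.Chars.find (PySem.Chars.join ['\n'] (s0.toList :: rs.map String.toList))
                  ['\n','#','#',' ']).toNat + 1 : Nat) : Int) := by
            rw [hfeq]; omega
          rw [hcast, ← String.toList_inj]
          simp only [String.toList_append, PySem.Str.toList_slice, PySem.Str.toList_join,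
            List.map_cons]
          rw [show ("\n".toList) = ['\n'] from rfl,
            show ("<!-- more -->\n\n".toList) = moreT ++ ['\n','\n'] from rfl]
          rw [show (PySem.Chars.slice
                (PySem.Chars.join ['\n'] (s0.toList :: List.map String.toList rs)) none
                (some (((PySem.Chars.find (PySem.Chars.join ['\n']
                  (s0.toList :: List.map String.toList rs)) ['\n','#','#',' ']).toNat + 1 : Nat) : Int)))
              = (PySem.Chars.join ['\n'] (s0.toList :: List.map String.toList rs)).take
                  ((PySem.Chars.find (PySem.Chars.join ['\n']
                    (s0.toList :: List.map String.toList rs)) ['\n','#','#',' ']).toNat + 1) from by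
            show PySem.List.slice _ none (some _) = _
            rw [PySem.List.slice_to_natCast]]
          rw [show (PySem.Chars.slice
                (PySem.Chars.join ['\n'] (s0.toList :: List.map String.toList rs))
                (some (((PySem.Chars.find (PySem.Chars.join ['\n']
                  (s0.toList :: List.map String.toList rs)) ['\n','#','#',' ']).toNat + 1 : Nat) : Int)) none)
              = (PySem.Chars.join ['\n'] (s0.toList :: List.map String.toList rs)).drop
                  ((PySem.Chars.find (PySem.Chars.join ['\n']
                    (s0.toList :: List.map String.toList rs)) ['\n','#','#',' ']).toNat + 1) from by
            show PySem.List.slice _ (some _) none = _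
            rw [PySem.List.slice_from_natCast]]
          rw [show (List.map String.toList (insS (s0 :: rs)))
              = insC (s0.toList :: rs.map String.toList) from by
            rw [insS_toList, List.map_cons]]
          rw [hcore, if_neg hf]
          simp
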